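-- pv_equiv track=rewrite | github.com/EDRN/jpl.labcas.infosphere | src/jpl/labcas/infosphere/app.py | _report_rows
-- ===== SOURCE A (Python) =====
-- def _report_rows(report: dict[str, dict[str, dict[str, str]]]) -> list[dict[str, str]]:
--     '''Flatten the imaging report into sorted row dictionaries.'''
--     rows: list[dict[str, str]] = []
--     for collection in sorted(report.keys()):
--         for site in sorted(report[collection].keys()):
--             for event in sorted(report[collection][site].keys()):
--                 rows.append({
--                     'collection': collection,
--                     'site': site,
--                     'event': event,
--                     'participantId': report[collection][site][event],
--                 })
--     return rows
-- ===== SOURCE B (Python) =====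
-- def _report_rows(report: dict[str, dict[str, dict[str, str]]]) -> list[dict[str, str]]:
--     '''Flatten the imaging report in dict order, then sort once by (collection, site, event).'''
--     rows: list[dict[str, str]] = []
--     for collection, sites in report.items():
--         for site, events in sites.items():
--             for event, participant_id in events.items():
--                 rows.append({
--                     'collection': collection,
--                     'site': site,
--                     'event': event,
--                     'participantId': participant_id,
--                 })
--     return sorted(rows, key=lambda r: (r['collection'], r['site'], r['event']))
-- ===== Notes on version B (the rewrite author's own statement) =====
-- stated objective: simpler
-- what changed: B flattens the nested dict in plain insertion order with no per-level sorting, then performs one final sort of the flat row list by the (collection, site, event) key, replacing A's three nested sorted() scans with a single sort.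
import Mathlib
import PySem

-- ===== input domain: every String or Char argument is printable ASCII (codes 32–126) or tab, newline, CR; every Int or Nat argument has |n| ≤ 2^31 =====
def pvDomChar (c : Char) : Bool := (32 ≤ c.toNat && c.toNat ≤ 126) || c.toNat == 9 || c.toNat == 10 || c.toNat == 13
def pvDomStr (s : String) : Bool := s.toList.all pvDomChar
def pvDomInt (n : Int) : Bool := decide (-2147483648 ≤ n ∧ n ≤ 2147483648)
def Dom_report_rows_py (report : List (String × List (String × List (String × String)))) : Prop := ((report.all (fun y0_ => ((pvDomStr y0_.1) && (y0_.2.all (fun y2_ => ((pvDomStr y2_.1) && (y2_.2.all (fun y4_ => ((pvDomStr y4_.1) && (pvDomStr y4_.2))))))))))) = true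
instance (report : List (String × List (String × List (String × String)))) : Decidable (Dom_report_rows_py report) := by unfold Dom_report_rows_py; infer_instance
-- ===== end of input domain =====

-- B flattens the nested dict in plain insertion order and then sorts the flat row list once by the
-- (collection, site, event) key, replacing A's three nested per-level sorted() scans (objective: simpler).

-- ===== PORT A =====
-- for collection in sorted(report.keys()): for site in sorted(...): for event in sorted(...): rows.append({...})
-- report[collection] etc. are ported as (get? _).getD [] — the keys come from the dict itself, so the
-- lookup always succeeds and the default is never used.
def report_rows_py (report : List (String × List (String × List (String × String)))) : List (List (String × String)) :=
  let d := PySem.Dict.ofList report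
  (PySem.List.sorted d.keys (fun k => k) false).foldl (fun rows collection =>
    let dc := PySem.Dict.ofList ((d.get? collection).getD [])
    (PySem.List.sorted dc.keys (fun k => k) false).foldl (fun rows site =>
      let ds := PySem.Dict.ofList ((dc.get? site).getD [])
      (PySem.List.sorted ds.keys (fun k => k) false).foldl (fun rows event =>
        rows ++ [[("collection", collection), ("site", site), ("event", event),
                  ("participantId", (ds.get? event).getD "")]]) rows) rows) []

-- ===== PORT B =====
-- key = lambda r: (r['collection'], r['site'], r['event']) — Python tuple comparison is lexicographic,
-- ported with PySem's tuple-key sort sorted2: first key r['collection'], second key the lexicographic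
-- pair (r['site'], r['event']).
def report_rows_py_alt (report : List (String × List (String × List (String × String)))) : List (List (String × String)) :=
  let rows := (PySem.Dict.ofList report).items.foldl (fun rows cp =>
    (PySem.Dict.ofList cp.2).items.foldl (fun rows sp =>
      (PySem.Dict.ofList sp.2).items.foldl (fun rows ep =>
        rows ++ [[("collection", cp.1), ("site", sp.1), ("event", ep.1),
                  ("participantId", ep.2)]]) rows) rows) []
  PySem.List.sorted2 rows
    (fun r => (PySem.Dict.mk r).getD "collection" "")
    (fun r => toLex ((PySem.Dict.mk r).getD "site" "", (PySem.Dict.mk r).getD "event" "")) false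

-- ===== PRECONDITION & SPEC =====
def Spec_report_rows_py (report : List (String × List (String × List (String × String)))) (out : List (List (String × String))) : Prop := out = report_rows_py_alt report
instance (report : List (String × List (String × List (String × String)))) (out : List (List (String × String))) : Decidable (Spec_report_rows_py report out) := by unfold Spec_report_rows_py; infer_instance

-- ===== CLAIM (what is proved, stated in full; the proofs are below) =====
def Claim_equal_report_rows_py : Prop := ∀ (report : List (String × List (String × List (String × String)))), Dom_report_rows_py report → Spec_report_rows_py report (report_rows_py report)

-- ===== LEMMAS AND PROOFS =====

def pvRowKey (r : List (String × String)) : Lex (String × Lex (String × String)) :=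
  toLex ((PySem.Dict.mk r).getD "collection" "",
         toLex ((PySem.Dict.mk r).getD "site" "", (PySem.Dict.mk r).getD "event" ""))

-- sorted2 with keys k1, k2 is sorted with the lexicographic pair key toLex (k1 ·, k2 ·)
theorem pvSorted2_eq_sorted_lex {α κ₁ κ₂ : Type} [LinearOrder κ₁] [LinearOrder κ₂]
    (xs : List α) (k1 : α → κ₁) (k2 : α → κ₂) :
    PySem.List.sorted2 xs k1 k2 false = PySem.List.sorted xs (fun x => toLex (k1 x, k2 x)) false := by
  unfold PySem.List.sorted2 PySem.List.sorted
  simp only [if_neg (by decide : ¬ (false = true))]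
  congr 1
  funext acc x
  congr 1
  funext a b
  rw [Bool.eq_iff_iff]
  simp only [Bool.or_eq_true, Bool.and_eq_true, Bool.not_eq_eq_eq_not, Bool.not_true,
    decide_eq_true_eq, decide_eq_false_iff_not, Prod.Lex.toLex_lt_toLex]
  constructor
  · rintro (h | ⟨h1, h2⟩)
    · exact Or.inl h
    · rcases lt_trichotomy (k1 a) (k1 b) with h' | h' | h'
      · exact Or.inl h'
      · exact Or.inr ⟨h', h2⟩
      · exact absurd h' h1
  · rintro (h | ⟨h1, h2⟩)
    · exact Or.inl h
    · exact Or.inr ⟨fun h' => absurd h1 (ne_of_gt h'), h2⟩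

def pvRow (c s e p : String) : List (String × String) :=
  [("collection", c), ("site", s), ("event", e), ("participantId", p)]

theorem pvRowKey_pvRow (c s e p : String) : pvRowKey (pvRow c s e p) = toLex (c, toLex (s, e)) := by
  simp [pvRowKey, pvRow, PySem.Dict.getD, PySem.Dict.get?_mk_cons]

-- the flattened (unsorted) row list B builds before its single sort
def pvFlat (report : List (String × List (String × List (String × String)))) : List (List (String × String)) :=
  (PySem.Dict.ofList report).items.flatMap (fun cp =>
    (PySem.Dict.ofList cp.2).items.flatMap (fun sp =>
      (PySem.Dict.ofList sp.2).items.map (fun ep => pvRow cp.1 sp.1 ep.1 ep.2)))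

theorem pvAlt_eq_sorted_flat (report : List (String × List (String × List (String × String)))) :
    report_rows_py_alt report = PySem.List.sorted (pvFlat report) pvRowKey false := by
  unfold report_rows_py_alt pvFlat
  rw [pvSorted2_eq_sorted_lex]
  simp only [PySem.List.foldl_append_singleton_eq_map, PySem.List.foldl_append_eq_flatMap]
  simp only [List.nil_append]
  rfl

-- A's nested loops as nested flatMaps over the sorted key lists
def pvAflat (report : List (String × List (String × List (String × String)))) : List (List (String × String)) :=
  let d := PySem.Dict.ofList report
  (PySem.List.sorted d.keys (fun k => k) false).flatMap (fun collection =>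
    let dc := PySem.Dict.ofList ((d.get? collection).getD [])
    (PySem.List.sorted dc.keys (fun k => k) false).flatMap (fun site =>
      let ds := PySem.Dict.ofList ((dc.get? site).getD [])
      (PySem.List.sorted ds.keys (fun k => k) false).map (fun event =>
        pvRow collection site event ((ds.get? event).getD ""))))

theorem pvA_eq_flat (report : List (String × List (String × List (String × String)))) :
    report_rows_py report = pvAflat report := by
  unfold report_rows_py pvAflat
  simp only [PySem.List.foldl_append_singleton_eq_map, PySem.List.foldl_append_eq_flatMap]
  simp [pvRow]

-- inner map over a dict's sorted keys is a permutation of the map over its items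
theorem pvPerm_inner {ν β : Type} (d : PySem.Dict String ν) (f : String → ν → β)
    (d0 : ν) (hnd : d.keys.Nodup) :
    ((PySem.List.sorted d.keys (fun k => k) false).map
        (fun k => f k ((d.get? k).getD d0)) |>.Perm
      (d.items.map (fun kv => f kv.1 kv.2))) := by
  have h1 : (PySem.List.sorted d.keys (fun k => k) false).Perm d.keys :=
    PySem.List.sorted_perm _ _ _
  refine ((h1.map _).trans ?_)
  have : d.keys = d.items.map Prod.fst := rfl
  rw [this, List.map_map]
  apply List.Perm.of_eq
  apply List.map_congr_left
  intro kv hkv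
  have : d.get? kv.1 = some kv.2 := PySem.Dict.get?_of_mem_items d (by exact hkv) hnd
  simp [Function.comp, this]

theorem pvPerm_inner_flat {ν β : Type} (d : PySem.Dict String ν) (f : String → ν → List β)
    (d0 : ν) (hnd : d.keys.Nodup) :
    ((PySem.List.sorted d.keys (fun k => k) false).flatMap
        (fun k => f k ((d.get? k).getD d0)) |>.Perm
      (d.items.flatMap (fun kv => f kv.1 kv.2))) := by
  have h1 : (PySem.List.sorted d.keys (fun k => k) false).Perm d.keys :=
    PySem.List.sorted_perm _ _ _
  refine (List.Perm.flatMap h1 (fun a _ => List.Perm.refl _)).trans ?_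
  have hk : d.keys = d.items.map Prod.fst := rfl
  rw [hk, List.flatMap_map]
  apply List.Perm.of_eq
  apply List.flatMap_congr
  intro kv hkv
  have : d.get? kv.1 = some kv.2 := PySem.Dict.get?_of_mem_items d (by exact hkv) hnd
  simp [this]

theorem pvA_perm_flat (report : List (String × List (String × List (String × String)))) :
    (pvAflat report).Perm (pvFlat report) := by
  unfold pvAflat pvFlat
  refine (pvPerm_inner_flat (PySem.Dict.ofList report) (fun c v =>
      (let dc := PySem.Dict.ofList v
       (PySem.List.sorted dc.keys (fun k => k) false).flatMap (fun site =>
         let ds := PySem.Dict.ofList ((dc.get? site).getD [])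
         (PySem.List.sorted ds.keys (fun k => k) false).map (fun event =>
           pvRow c site event ((ds.get? event).getD ""))))
      ) [] (PySem.Dict.nodup_keys_ofList _)).trans ?_
  apply List.Perm.flatMap (List.Perm.refl _)
  intro cp _
  refine (pvPerm_inner_flat (PySem.Dict.ofList cp.2) (fun s v =>
      (let ds := PySem.Dict.ofList v
       (PySem.List.sorted ds.keys (fun k => k) false).map (fun event =>
         pvRow cp.1 s event ((ds.get? event).getD "")))
      ) [] (PySem.Dict.nodup_keys_ofList _)).trans ?_
  apply List.Perm.flatMap (List.Perm.refl _)
  intro sp _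
  exact pvPerm_inner (PySem.Dict.ofList sp.2) (fun e v => pvRow cp.1 sp.1 e v)
      "" (PySem.Dict.nodup_keys_ofList _)

-- sorted distinct keys are strictly increasing
theorem pvSorted_keys_lt {ν : Type} (d : PySem.Dict String ν) (hnd : d.keys.Nodup) :
    (PySem.List.sorted d.keys (fun k => k) false).Pairwise (· < ·) := by
  have hle := PySem.List.sorted_pairwise d.keys (fun k => k)
  have hne : (PySem.List.sorted d.keys (fun k => k) false).Nodup :=
    (PySem.List.sorted_perm d.keys (fun k => k) false).nodup_iff.mpr hnd
  exact (hle.and hne).imp (fun h => lt_of_le_of_ne h.1 h.2)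

theorem pvA_pairwise (report : List (String × List (String × List (String × String)))) :
    (pvAflat report).Pairwise (fun a b => pvRowKey a < pvRowKey b) := by
  unfold pvAflat
  rw [List.pairwise_flatMap]
  constructor
  · intro c _
    rw [List.pairwise_flatMap]
    constructor
    · intro s _
      rw [List.pairwise_map]
      refine (pvSorted_keys_lt _ (PySem.Dict.nodup_keys_ofList _)).imp ?_
      intro e e' hlt
      simp only [pvRowKey_pvRow, Prod.Lex.toLex_lt_toLex]
      tauto
    · refine (pvSorted_keys_lt _ (PySem.Dict.nodup_keys_ofList _)).imp ?_
      intro s s' hlt x hx y hy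
      simp only [List.mem_map] at hx hy
      obtain ⟨e, _, rfl⟩ := hx
      obtain ⟨e', _, rfl⟩ := hy
      simp only [pvRowKey_pvRow, Prod.Lex.toLex_lt_toLex]
      tauto
  · refine (pvSorted_keys_lt _ (PySem.Dict.nodup_keys_ofList _)).imp ?_
    intro c c' hlt x hx y hy
    simp only [List.mem_flatMap, List.mem_map] at hx hy
    obtain ⟨s, _, e, _, rfl⟩ := hx
    obtain ⟨s', _, e', _, rfl⟩ := hy
    simp only [pvRowKey_pvRow, Prod.Lex.toLex_lt_toLex]
    tauto

-- ===== VERDICT (by name: the statement is the Claim_ definition above) =====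
theorem report_rows_py_spec : Claim_equal_report_rows_py := by
  intro report _
  show report_rows_py report = report_rows_py_alt report
  rw [pvAlt_eq_sorted_flat, pvA_eq_flat]
  exact (PySem.List.sorted_eq_of_perm_of_pairwise_lt _ _ _
    (pvA_perm_flat report) (pvA_pairwise report)).symm
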